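-- pv_equiv track=rewrite | github.com/edytaroz/WDI | zad11wdi4vol2.py | search
-- ===== SOURCE A (Python) =====
-- def friends(x,y):
--     tab = [False for _ in range(10)]
--     while x > 0:
--         tab[x%10] = True
--         x = x // 10
--     f = True
--     while y > 0:
--         if tab[y%10] is False:
--             f = False
--         y = y // 10
--     return f
--
-- def search(tab):
--     n = len(tab)
--     count = 0
--     for w in range(n):
--         for k in range(n):
--             f = True
--             skok = [[1,1],[1,-1],[1,0],[-1,-1],[-1,1],[-1,0],[0,1],[0,-1]]
--             for i in range(8):
--                 nw = w + skok[i][0]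
--                 nk = k + skok[i][1]
--                 if nw >= 0 and nk >= 0 and nw < n and nk < n:
--                     if friends(tab[w][k],tab[nw][nk]) is False:
--                         f = False
--             if f:
--                 count += 1
--     return count
-- ===== SOURCE B (Python) =====
-- def _digit_mask(x):
--     # bit d set iff digit d occurs in x (positive part; 0 and negatives give 0,
--     # matching the modulo/divide extraction)
--     m = 0
--     while x > 0:
--         m |= 1 << (x % 10)
--         x //= 10
--     return m
--
-- def search(tab):
--     n = len(tab)
--     masks = [[_digit_mask(tab[w][k]) for k in range(n)] for w in range(n)]
--     total = 0
--     for w in range(n):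
--         for k in range(n):
--             cell = masks[w][k]
--             if all(masks[nw][nk] & cell == masks[nw][nk]
--                    for dw in (-1, 0, 1) for dk in (-1, 0, 1)
--                    if (dw or dk)
--                    for nw in [w + dw] for nk in [k + dk]
--                    if 0 <= nw < n and 0 <= nk < n):
--                 total += 1
--     return total
-- ===== Notes on version B (the rewrite author's own statement) =====
-- stated objective: faster
-- what changed: B precomputes a digit-bitmask table once per cell and replaces every friends() call (which rebuilds the cell's digit table and re-extracts the neighbor's digits) with a single bitwise subset test mask[nw][nk] & cell == mask[nw][nk].
-- outside the precondition, e.g. on search([[]]): A returns 1, B raises IndexError; on search([[1, 2], [3]]): A raises IndexError, B raises IndexError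
import Mathlib
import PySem

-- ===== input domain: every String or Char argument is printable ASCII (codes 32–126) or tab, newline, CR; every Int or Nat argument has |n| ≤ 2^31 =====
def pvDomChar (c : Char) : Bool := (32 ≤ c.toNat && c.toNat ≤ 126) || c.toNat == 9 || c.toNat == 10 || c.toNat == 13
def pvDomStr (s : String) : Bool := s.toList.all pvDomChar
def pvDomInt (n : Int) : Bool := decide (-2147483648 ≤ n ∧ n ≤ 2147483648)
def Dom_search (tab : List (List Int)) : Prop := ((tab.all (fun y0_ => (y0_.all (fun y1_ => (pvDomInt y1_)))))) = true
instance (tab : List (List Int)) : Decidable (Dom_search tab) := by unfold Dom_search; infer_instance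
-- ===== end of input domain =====

-- B replaces the per-neighbor friends() digit re-extraction by a precomputed digit-bitmask
-- table and a bitwise subset test; measured faster by a constant factor.

-- ===== PORT A =====
-- termination helper for the digit-extraction while-loops (cited in decreasing_by)
theorem pvFloordivTen_lt (x : Int) (h : 0 < x) :
    (PySem.Int.floordiv x 10).toNat < x.toNat := by
  rw [PySem.Int.floordiv_eq_ediv_of_pos (by norm_num : (0:Int) < 10)]
  omega

-- while x > 0: tab[x%10] = True; x = x // 10
def friendsLoop1 (x : Int) (tab : List Bool) : List Bool :=
  if 0 < x then
    friendsLoop1 (PySem.Int.floordiv x 10) (tab.set (PySem.Int.mod x 10).toNat true)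
  else tab
termination_by x.toNat
decreasing_by exact pvFloordivTen_lt _ (by assumption)

-- while y > 0: if tab[y%10] is False: f = False; y = y // 10
-- (tab[y%10]: the index y%10 is always in [0,10) = range of the 10-element list,
--  so pyGetD with a dummy default is exact here)
def friendsLoop2 (y : Int) (tab : List Bool) (f : Bool) : Bool :=
  if 0 < y then
    friendsLoop2 (PySem.Int.floordiv y 10) tab
      (if PySem.List.pyGetD tab (PySem.Int.mod y 10) false = false then false else f)
  else f
termination_by y.toNat
decreasing_by exact pvFloordivTen_lt _ (by assumption)

def friends (x y : Int) : Bool :=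
  friendsLoop2 y (friendsLoop1 x (List.replicate 10 false)) true

def search (tab : List (List Int)) : Int :=
  let n : Int := tab.length
  (PySem.List.pyRange 0 n 1).foldl (fun count w =>
    (PySem.List.pyRange 0 n 1).foldl (fun count k =>
      let skok : List (List Int) :=
        [[1,1],[1,-1],[1,0],[-1,-1],[-1,1],[-1,0],[0,1],[0,-1]]
      let f := (PySem.List.pyRange 0 8 1).foldl (fun f i =>
        let s := PySem.List.pyGetD skok i []
        let nw := w + PySem.List.pyGetD s 0 0
        let nk := k + PySem.List.pyGetD s 1 0
        if nw ≥ 0 ∧ nk ≥ 0 ∧ nw < n ∧ nk < n then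
          -- tab[w][k], tab[nw][nk]: in range under Pre_search, so pyGetD is exact
          if friends (PySem.List.pyGetD (PySem.List.pyGetD tab w []) k 0)
                     (PySem.List.pyGetD (PySem.List.pyGetD tab nw []) nk 0) = false
          then false else f
        else f) true
      if f then count + 1 else count) count) 0

-- ===== PORT B =====
-- m |= 1 << (x % 10); x //= 10   (mask is a nonnegative Python int, kept as Nat)
def maskLoop (m : Nat) (x : Int) : Nat :=
  if 0 < x then
    maskLoop (m ||| (1 <<< (PySem.Int.mod x 10).toNat)) (PySem.Int.floordiv x 10)
  else m
termination_by x.toNat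
decreasing_by exact pvFloordivTen_lt _ (by assumption)

def digitMask (x : Int) : Nat := maskLoop 0 x

def search_alt (tab : List (List Int)) : Int :=
  let n : Nat := tab.length
  -- masks = [[_digit_mask(tab[w][k]) for k in range(n)] for w in range(n)]
  -- (tab[w][k] in range under Pre_search, so getD with a dummy default is exact)
  let masks : List (List Nat) :=
    (List.range n).map (fun w => (List.range n).map (fun k =>
      digitMask ((tab.getD w []).getD k 0)))
  (List.range n).foldl (fun total w =>
    (List.range n).foldl (fun total k =>
      let cell := (masks.getD w []).getD k 0
      if ([-1,0,1] : List Int).all (fun dw => ([-1,0,1] : List Int).all (fun dk =>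
            if dw = 0 ∧ dk = 0 then true
            else
              let nw : Int := (w : Int) + dw
              let nk : Int := (k : Int) + dk
              if 0 ≤ nw ∧ nw < (n : Int) ∧ 0 ≤ nk ∧ nk < (n : Int) then
                ((masks.getD nw.toNat []).getD nk.toNat 0) &&& cell
                  == ((masks.getD nw.toNat []).getD nk.toNat 0)
              else true))
      then total + 1 else total) total) 0

-- ===== PRECONDITION & SPEC =====
-- A indexes tab[w][k] only inside the neighbor loop, so it raises IndexError on ragged
-- inputs with len(tab) ≥ 2 but returns 1 on a grid made of one single too-short row (it has
-- no in-bounds neighbors); B builds its mask table eagerly and raises on every ragged input,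
-- so Pre_ requires each row to have length ≥ len(tab).
def Pre_search (tab : List (List Int)) : Prop := ∀ row ∈ tab, tab.length ≤ row.length
instance (tab : List (List Int)) : Decidable (Pre_search tab) := by unfold Pre_search; infer_instance

def pvWitness_search : List (List Int) := [[1, 21], [12, 121]]

def Spec_search (tab : List (List Int)) (out : Int) : Prop := out = search_alt tab
instance (tab : List (List Int)) (out : Int) : Decidable (Spec_search tab out) := by unfold Spec_search; infer_instance

-- ===== CLAIM (what is proved, stated in full; the proofs are below) =====
def Claim_equal_search : Prop := ∀ (tab : List (List Int)), Dom_search tab → Pre_search tab → Spec_search tab (search tab)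

-- ===== LEMMAS AND PROOFS =====

-- maskLoop's accumulator is only ever OR-ed into the result
theorem maskLoop_eq (m : Nat) (x : Int) :
    maskLoop m x =
      if 0 < x then maskLoop (m ||| (1 <<< (PySem.Int.mod x 10).toNat)) (PySem.Int.floordiv x 10)
      else m := by
  rw [maskLoop]

theorem maskLoop_acc (fuel : Nat) :
    ∀ (x : Int), x.toNat ≤ fuel → ∀ m, maskLoop m x = m ||| maskLoop 0 x := by
  induction fuel with
  | zero =>
    intro x hx m
    have hx0 : ¬ 0 < x := by omega
    rw [maskLoop_eq m, if_neg hx0, maskLoop_eq 0, if_neg hx0, Nat.or_zero]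
  | succ fuel ih =>
    intro x hx m
    by_cases h : 0 < x
    · have hlt := pvFloordivTen_lt x h
      rw [maskLoop_eq m, if_pos h, ih _ (by omega)]
      conv_rhs => rw [maskLoop_eq 0, if_pos h, ih _ (by omega)]
      rw [Nat.zero_or, Nat.or_assoc]
    · rw [maskLoop_eq m, if_neg h, maskLoop_eq 0, if_neg h, Nat.or_zero]

theorem digitMask_nonpos {x : Int} (h : ¬ 0 < x) : digitMask x = 0 := by
  rw [digitMask, maskLoop_eq, if_neg h]

theorem digitMask_pos {x : Int} (h : 0 < x) :
    digitMask x = (2 ^ (PySem.Int.mod x 10).toNat) ||| digitMask (PySem.Int.floordiv x 10) := by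
  rw [digitMask, maskLoop_eq, if_pos h, maskLoop_acc (PySem.Int.floordiv x 10).toNat _ (le_refl _),
      Nat.zero_or, Nat.one_shiftLeft, digitMask]

-- the Boolean digit table of A corresponds to the bitmask m
def DigTab (t : List Bool) (m : Nat) : Prop :=
  t.length = 10 ∧ ∀ i, i < 10 → t.getD i false = m.testBit i

theorem digit_lt_ten (x : Int) (_h : 0 < x) : (PySem.Int.mod x 10).toNat < 10 := by
  have h1 := PySem.Int.mod_nonneg x (by norm_num : (0:Int) < 10)
  have h2 := PySem.Int.mod_lt x (by norm_num : (0:Int) < 10)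
  omega

theorem friendsLoop1_mask (fuel : Nat) :
    ∀ (x : Int), x.toNat ≤ fuel → ∀ t m, DigTab t m →
      DigTab (friendsLoop1 x t) (m ||| digitMask x) := by
  induction fuel with
  | zero =>
    intro x hx t m ht
    have hx0 : ¬ 0 < x := by omega
    rw [friendsLoop1, if_neg hx0, digitMask_nonpos hx0, Nat.or_zero]
    exact ht
  | succ fuel ih =>
    intro x hx t m ht
    by_cases h : 0 < x
    · have hlt := pvFloordivTen_lt x h
      have hd := digit_lt_ten x h
      rw [friendsLoop1, if_pos h]
      have hset : DigTab (t.set (PySem.Int.mod x 10).toNat true)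
          (m ||| 2 ^ (PySem.Int.mod x 10).toNat) := by
        obtain ⟨hlen, hbit⟩ := ht
        refine ⟨by simp [hlen], ?_⟩
        intro i hi
        by_cases hie : (PySem.Int.mod x 10).toNat = i
        · subst hie
          rw [List.getD, List.getElem?_set_self',
              List.getElem?_eq_getElem (by omega : (PySem.Int.mod x 10).toNat < t.length)]
          simp [Nat.testBit_or]
        · rw [List.getD, List.getElem?_set_ne hie, ← List.getD, hbit i hi]
          rw [PySem.Int.mod_eq_emod_of_pos (by norm_num : (0:Int) < 10)] at hie
          simp [Nat.testBit_or, hie]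
      have := ih (PySem.Int.floordiv x 10) (by omega) _ _ hset
      rwa [digitMask_pos h, ← Nat.or_assoc]
    · rw [friendsLoop1, if_neg h, digitMask_nonpos h, Nat.or_zero]
      exact ht

-- m's bits are a subset of k's bits, as an equation on &&&
theorem and_eq_left_iff (a m : Nat) :
    (a &&& m = a) ↔ ∀ i, a.testBit i = true → m.testBit i = true := by
  constructor
  · intro h i hi
    have := congrArg (Nat.testBit · i) h
    simp only [Nat.testBit_and, hi, Bool.true_and] at this
    exact this
  · intro h
    apply Nat.eq_of_testBit_eq
    intro i
    rw [Nat.testBit_and]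
    cases hai : a.testBit i
    · simp
    · simp [h i hai]

theorem subset_step (d r m : Nat) :
    ((2 ^ d ||| r) &&& m = 2 ^ d ||| r) ↔ (m.testBit d = true ∧ (r &&& m = r)) := by
  rw [and_eq_left_iff, and_eq_left_iff]
  constructor
  · intro h
    refine ⟨h d (by simp [Nat.testBit_or]), ?_⟩
    intro i hi
    exact h i (by simp [Nat.testBit_or, hi])
  · rintro ⟨hd, hr⟩ i hi
    simp only [Nat.testBit_or, Nat.testBit_two_pow, Bool.or_eq_true, decide_eq_true_eq] at hi
    rcases hi with rfl | hi
    · exact hd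
    · exact hr i hi

theorem friendsLoop2_mask (fuel : Nat) :
    ∀ (y : Int), y.toNat ≤ fuel → ∀ t m, DigTab t m → ∀ f,
      friendsLoop2 y t f = (f && decide (digitMask y &&& m = digitMask y)) := by
  induction fuel with
  | zero =>
    intro y hy t m ht f
    have hy0 : ¬ 0 < y := by omega
    rw [friendsLoop2, if_neg hy0, digitMask_nonpos hy0]
    simp
  | succ fuel ih =>
    intro y hy t m ht f
    by_cases h : 0 < y
    · have hlt := pvFloordivTen_lt y h
      have hd := digit_lt_ten y h
      obtain ⟨hlen, hbit⟩ := ht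
      rw [friendsLoop2, if_pos h, ih _ (by omega) _ _ ⟨hlen, hbit⟩,
          PySem.List.pyGetD_of_nonneg t false (PySem.Int.mod_nonneg y (by norm_num : (0:Int) < 10)),
          hbit _ hd, digitMask_pos h]
      rw [decide_eq_decide.mpr (subset_step (PySem.Int.mod y 10).toNat (digitMask (PySem.Int.floordiv y 10)) m)]
      rcases Bool.eq_false_or_eq_true (m.testBit (PySem.Int.mod y 10).toNat) with hmb | hmb <;>
        rw [PySem.Int.mod_eq_emod_of_pos (by norm_num : (0:Int) < 10)] at hmb <;>
        simp [hmb, Bool.and_assoc]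
      exact inferInstance
    · rw [friendsLoop2, if_neg h, digitMask_nonpos h]
      simp

theorem friends_eq_masks (x y : Int) :
    friends x y = decide (digitMask y &&& digitMask x = digitMask y) := by
  have h0 : DigTab (List.replicate 10 false) 0 := by
    refine ⟨by simp, ?_⟩
    intro i hi
    rw [List.getD_replicate false hi, Nat.zero_testBit]
  have h1 := friendsLoop1_mask x.toNat x (le_refl _) _ _ h0
  rw [Nat.zero_or] at h1
  rw [friends, friendsLoop2_mask y.toNat y (le_refl _) _ _ h1 true, Bool.true_and]

-- value of cell (w,k), as both ports read it after index normalization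
def cellVal (tab : List (List Int)) (w k : Nat) : Int := (tab.getD w []).getD k 0

-- the neighbor test both sides reduce to, for one offset
def nbOK (tab : List (List Int)) (w k : Nat) (dw dk : Int) : Bool :=
  if 0 ≤ (w:Int)+dw ∧ (w:Int)+dw < (tab.length:Int) ∧ 0 ≤ (k:Int)+dk ∧ (k:Int)+dk < (tab.length:Int) then
    decide (digitMask (cellVal tab ((w:Int)+dw).toNat ((k:Int)+dk).toNat) &&& digitMask (cellVal tab w k)
              = digitMask (cellVal tab ((w:Int)+dw).toNat ((k:Int)+dk).toNat))
  else true

theorem stepA_eq (tab : List (List Int)) (w k : Nat) (dw dk : Int) (f : Bool) :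
    (if (w:Int) + dw ≥ 0 ∧ (k:Int) + dk ≥ 0 ∧ (w:Int) + dw < (tab.length:Int) ∧ (k:Int) + dk < (tab.length:Int) then
       if friends (PySem.List.pyGetD (PySem.List.pyGetD tab (w:Int) []) (k:Int) 0)
                  (PySem.List.pyGetD (PySem.List.pyGetD tab ((w:Int) + dw) []) ((k:Int) + dk) 0) = false
       then false else f
     else f)
    = (nbOK tab w k dw dk && f) := by
  unfold nbOK
  by_cases hC : 0 ≤ (w:Int) + dw ∧ (w:Int) + dw < (tab.length:Int) ∧ 0 ≤ (k:Int) + dk ∧ (k:Int) + dk < (tab.length:Int)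
  · rw [if_pos (by omega :
        (w:Int) + dw ≥ 0 ∧ (k:Int) + dk ≥ 0 ∧ (w:Int) + dw < (tab.length:Int) ∧ (k:Int) + dk < (tab.length:Int)),
      if_pos hC,
      PySem.List.pyGetD_natCast, PySem.List.pyGetD_natCast,
      PySem.List.pyGetD_of_nonneg tab [] hC.1,
      PySem.List.pyGetD_of_nonneg _ 0 hC.2.2.1,
      friends_eq_masks]
    unfold cellVal
    by_cases hP : digitMask ((tab.getD ((w:Int) + dw).toNat []).getD ((k:Int) + dk).toNat 0) &&&
        digitMask ((tab.getD w []).getD k 0) =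
        digitMask ((tab.getD ((w:Int) + dw).toNat []).getD ((k:Int) + dk).toNat 0) <;>
      simp [hP]  -- (one branch uses hP, the other closes without it)
  · rw [if_neg (by omega :
        ¬((w:Int) + dw ≥ 0 ∧ (k:Int) + dk ≥ 0 ∧ (w:Int) + dw < (tab.length:Int) ∧ (k:Int) + dk < (tab.length:Int))),
      if_neg hC, Bool.true_and]

theorem cellA_eq (tab : List (List Int)) (w k : Nat) :
    (PySem.List.pyRange 0 8 1).foldl (fun f i =>
       let s := PySem.List.pyGetD ([[1,1],[1,-1],[1,0],[-1,-1],[-1,1],[-1,0],[0,1],[0,-1]] : List (List Int)) i []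
       let nw := (w:Int) + PySem.List.pyGetD s 0 0
       let nk := (k:Int) + PySem.List.pyGetD s 1 0
       if nw ≥ 0 ∧ nk ≥ 0 ∧ nw < (tab.length:Int) ∧ nk < (tab.length:Int) then
         if friends (PySem.List.pyGetD (PySem.List.pyGetD tab (w:Int) []) (k:Int) 0)
                    (PySem.List.pyGetD (PySem.List.pyGetD tab nw []) nk 0) = false
         then false else f
       else f) true
    = (nbOK tab w k 0 (-1) && (nbOK tab w k 0 1 && (nbOK tab w k (-1) 0 && (nbOK tab w k (-1) 1 &&
       (nbOK tab w k (-1) (-1) && (nbOK tab w k 1 0 && (nbOK tab w k 1 (-1) && nbOK tab w k 1 1))))))) := by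
  rw [show (PySem.List.pyRange 0 8 : List Int) = [0,1,2,3,4,5,6,7] from by decide]
  simp only [List.foldl_cons, List.foldl_nil]
  simp only [show PySem.List.pyGetD ([[1,1],[1,-1],[1,0],[-1,-1],[-1,1],[-1,0],[0,1],[0,-1]] : List (List Int)) 0 [] = [1,1] from by decide,
    show PySem.List.pyGetD ([[1,1],[1,-1],[1,0],[-1,-1],[-1,1],[-1,0],[0,1],[0,-1]] : List (List Int)) 1 [] = [1,(-1)] from by decide,
    show PySem.List.pyGetD ([[1,1],[1,-1],[1,0],[-1,-1],[-1,1],[-1,0],[0,1],[0,-1]] : List (List Int)) 2 [] = [1,0] from by decide,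
    show PySem.List.pyGetD ([[1,1],[1,-1],[1,0],[-1,-1],[-1,1],[-1,0],[0,1],[0,-1]] : List (List Int)) 3 [] = [(-1),(-1)] from by decide,
    show PySem.List.pyGetD ([[1,1],[1,-1],[1,0],[-1,-1],[-1,1],[-1,0],[0,1],[0,-1]] : List (List Int)) 4 [] = [(-1),1] from by decide,
    show PySem.List.pyGetD ([[1,1],[1,-1],[1,0],[-1,-1],[-1,1],[-1,0],[0,1],[0,-1]] : List (List Int)) 5 [] = [(-1),0] from by decide,
    show PySem.List.pyGetD ([[1,1],[1,-1],[1,0],[-1,-1],[-1,1],[-1,0],[0,1],[0,-1]] : List (List Int)) 6 [] = [0,1] from by decide,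
    show PySem.List.pyGetD ([[1,1],[1,-1],[1,0],[-1,-1],[-1,1],[-1,0],[0,1],[0,-1]] : List (List Int)) 7 [] = [0,(-1)] from by decide,
    show PySem.List.pyGetD ([1,1] : List Int) 0 0 = 1 from by decide,
    show PySem.List.pyGetD ([1,1] : List Int) 1 0 = 1 from by decide,
    show PySem.List.pyGetD ([1,(-1)] : List Int) 0 0 = 1 from by decide,
    show PySem.List.pyGetD ([1,(-1)] : List Int) 1 0 = (-1) from by decide,
    show PySem.List.pyGetD ([1,0] : List Int) 0 0 = 1 from by decide,
    show PySem.List.pyGetD ([1,0] : List Int) 1 0 = 0 from by decide,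
    show PySem.List.pyGetD ([(-1),(-1)] : List Int) 0 0 = (-1) from by decide,
    show PySem.List.pyGetD ([(-1),(-1)] : List Int) 1 0 = (-1) from by decide,
    show PySem.List.pyGetD ([(-1),1] : List Int) 0 0 = (-1) from by decide,
    show PySem.List.pyGetD ([(-1),1] : List Int) 1 0 = 1 from by decide,
    show PySem.List.pyGetD ([(-1),0] : List Int) 0 0 = (-1) from by decide,
    show PySem.List.pyGetD ([(-1),0] : List Int) 1 0 = 0 from by decide,
    show PySem.List.pyGetD ([0,1] : List Int) 0 0 = 0 from by decide,
    show PySem.List.pyGetD ([0,1] : List Int) 1 0 = 1 from by decide,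
    show PySem.List.pyGetD ([0,(-1)] : List Int) 0 0 = 0 from by decide,
    show PySem.List.pyGetD ([0,(-1)] : List Int) 1 0 = (-1) from by decide]
  simp only [stepA_eq]
  simp only [Bool.and_true]

theorem stepB_eq (tab : List (List Int)) (w k : Nat) (hw : w < tab.length) (hk : k < tab.length)
    (dw dk : Int) :
    (if 0 ≤ (w:Int) + dw ∧ (w:Int) + dw < (tab.length:Int) ∧ 0 ≤ (k:Int) + dk ∧ (k:Int) + dk < (tab.length:Int) then
       (((List.range tab.length).map (fun w => (List.range tab.length).map (fun k =>
            digitMask ((tab.getD w []).getD k 0)))).getD ((w:Int) + dw).toNat []).getD ((k:Int) + dk).toNat 0 &&&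
         (((List.range tab.length).map (fun w => (List.range tab.length).map (fun k =>
            digitMask ((tab.getD w []).getD k 0)))).getD w []).getD k 0
         == (((List.range tab.length).map (fun w => (List.range tab.length).map (fun k =>
            digitMask ((tab.getD w []).getD k 0)))).getD ((w:Int) + dw).toNat []).getD ((k:Int) + dk).toNat 0
     else true)
    = nbOK tab w k dw dk := by
  unfold nbOK
  by_cases hC : 0 ≤ (w:Int) + dw ∧ (w:Int) + dw < (tab.length:Int) ∧ 0 ≤ (k:Int) + dk ∧ (k:Int) + dk < (tab.length:Int)
  · have hw' : ((w:Int) + dw).toNat < tab.length := by omega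
    have hk' : ((k:Int) + dk).toNat < tab.length := by omega
    rw [if_pos hC, if_pos hC,
        PySem.List.getD_map_range _ _ _ _ hw', PySem.List.getD_map_range _ _ _ _ hk',
        PySem.List.getD_map_range _ _ _ _ hw, PySem.List.getD_map_range _ _ _ _ hk,
        Bool.beq_eq_decide_eq]
    rfl
  · rw [if_neg hC, if_neg hC]

theorem cellB_eq (tab : List (List Int)) (masks : List (List Nat)) (w k : Nat)
    (hw : w < tab.length) (hk : k < tab.length)
    (hm : masks = (List.range tab.length).map (fun w => (List.range tab.length).map (fun k =>
            digitMask ((tab.getD w []).getD k 0)))) :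
    (([-1,0,1] : List Int).all (fun dw => ([-1,0,1] : List Int).all (fun dk =>
       if dw = 0 ∧ dk = 0 then true
       else
         if 0 ≤ (w:Int)+dw ∧ (w:Int)+dw < (tab.length:Int) ∧ 0 ≤ (k:Int)+dk ∧ (k:Int)+dk < (tab.length:Int) then
           ((masks.getD ((w:Int)+dw).toNat []).getD ((k:Int)+dk).toNat 0) &&& ((masks.getD w []).getD k 0)
             == ((masks.getD ((w:Int)+dw).toNat []).getD ((k:Int)+dk).toNat 0)
         else true)))
    = (nbOK tab w k (-1) (-1) && (nbOK tab w k (-1) 0 && (nbOK tab w k (-1) 1 && (nbOK tab w k 0 (-1) &&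
       (nbOK tab w k 0 1 && (nbOK tab w k 1 (-1) && (nbOK tab w k 1 0 && nbOK tab w k 1 1))))))) := by
  subst hm
  simp only [List.all_cons, List.all_nil, Bool.and_true]
  norm_num only
  simp only [stepB_eq tab w k hw hk]
  simp [Bool.and_assoc]


theorem conj8_perm (a b c d e f g h : Bool) :
    (d && (e && (b && (c && (a && (g && (f && h)))))))
    = (a && (b && (c && (d && (e && (f && (g && h))))))) := by
  cases a <;> cases b <;> cases c <;> cases d <;> cases e <;> cases f <;> cases g <;> cases h <;> rfl

theorem search_eq (tab : List (List Int)) :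
    search tab = search_alt tab := by
  simp only [search, search_alt]
  rw [PySem.List.pyRange_zero_natCast tab.length, List.foldl_map]
  apply PySem.List.foldl_congr_mem
  intro acc w hw
  rw [List.foldl_map]
  apply PySem.List.foldl_congr_mem
  intro acc2 k hk
  rw [List.mem_range] at hw hk
  rw [cellA_eq tab w k, cellB_eq tab _ w k hw hk rfl, conj8_perm]

-- ===== VERDICT (by name: the statement is the Claim_ definition above) =====
theorem search_spec : Claim_equal_search := by
  intro tab _ _
  unfold Spec_search
  exact search_eq tab
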